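-- pv_equiv track=rewrite | github.com/semify-eda/tristan | core/custom/tb_cntb2.py | cntb_soft
-- ===== SOURCE A (Python) =====
-- def cntb_soft(value, index):
--     count = 0
--     bit_value = (value >> index) & 1
--
--     while (index > 0):
--         index -= 1
--         next_bit = (value >> index) & 1
--         if (next_bit != bit_value):
--             break
--         count += 1
--
--     return count
-- ===== SOURCE B (Python) =====
-- def cntb_soft(value, index):
--     # O(1): the bits below `index` that differ from bit `index` form the number
--     # `diff`; its bit_length locates the first (highest) differing bit.
--     m = 1 << index
--     diff = value % m                 # the low `index` bits, as a nonnegative int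
--     if (value >> index) % 2:         # reference bit is 1: flip the low bits
--         diff = m - 1 - diff
--     return index - diff.bit_length()
-- ===== Notes on version B (the rewrite author's own statement) =====
-- stated objective: faster
-- what changed: replaces the bit-by-bit downward scan with an O(1) closed form: reduce value modulo 2**index, complement the low bits when the reference bit is 1, and read the position of the first differing bit off bit_length
import Mathlib
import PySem

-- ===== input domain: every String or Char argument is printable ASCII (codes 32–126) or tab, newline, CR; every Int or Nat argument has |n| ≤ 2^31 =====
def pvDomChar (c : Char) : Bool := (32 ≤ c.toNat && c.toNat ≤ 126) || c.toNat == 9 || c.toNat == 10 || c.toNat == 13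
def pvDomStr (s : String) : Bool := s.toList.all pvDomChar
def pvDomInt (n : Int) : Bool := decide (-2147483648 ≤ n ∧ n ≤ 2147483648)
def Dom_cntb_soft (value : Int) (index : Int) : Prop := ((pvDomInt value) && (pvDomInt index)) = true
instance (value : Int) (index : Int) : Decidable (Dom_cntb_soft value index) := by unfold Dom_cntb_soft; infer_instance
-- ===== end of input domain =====

-- B replaces A's bit-by-bit downward scan with an O(1) closed form built from %, a
-- complement and bit_length; equivalence of return values is proved for index ≥ 0.

-- ===== PORT A =====
-- the while loop, recursing on the (nonnegative) loop counter `index`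
def cntb_softLoop (value : Int) (bit_value : Int) : Nat → Int → Int
  | 0, count => count
  | k+1, count =>
    let next_bit := PySem.Int.band (value >>> k) 1
    if next_bit ≠ bit_value then count
    else cntb_softLoop value bit_value k (count + 1)

def cntb_soft (value : Int) (index : Int) : Int :=
  let bit_value := PySem.Int.band (value >>> index.toNat) 1
  cntb_softLoop value bit_value index.toNat 0

-- ===== PORT B =====
def cntb_soft_alt (value : Int) (index : Int) : Int :=
  let m : Int := (1 : Int) <<< index.toNat
  let diff := PySem.Int.mod value m
  let diff := if PySem.Int.mod (value >>> index.toNat) 2 ≠ 0 then m - 1 - diff else diff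
  index - (PySem.Int.bitLength diff : Int)

-- ===== PRECONDITION & SPEC =====
-- Python raises ValueError ("negative shift count") on index < 0.
def Pre_cntb_soft (value : Int) (index : Int) : Prop := 0 ≤ index
instance (value : Int) (index : Int) : Decidable (Pre_cntb_soft value index) := by unfold Pre_cntb_soft; infer_instance
def pvWitness_cntb_soft : Int × Int := (5, 2)

def Spec_cntb_soft (value : Int) (index : Int) (out : Int) : Prop := out = cntb_soft_alt value index
instance (value : Int) (index : Int) (out : Int) : Decidable (Spec_cntb_soft value index out) := by unfold Spec_cntb_soft; infer_instance

-- ===== CLAIM (what is proved, stated in full; the proofs are below) =====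
def Claim_equal_cntb_soft : Prop := ∀ (value : Int) (index : Int), Dom_cntb_soft value index → Pre_cntb_soft value index → Spec_cntb_soft value index (cntb_soft value index)

-- ===== LEMMAS AND PROOFS =====

-- the "difference word": the low k bits of value, complemented when b = 1
def pvDiffWord (value : Int) (b : Int) (k : Nat) : Int :=
  if b = 1 then 2^k - 1 - value % 2^k else value % 2^k

theorem pv_emod_split (x : Int) (k : Nat) :
    x % 2^(k+1) = x % 2^k + 2^k * ((x / 2^k) % 2) := by
  have hk : (0:Int) < 2^k := by positivity
  have h1 : 2^k * (x / 2^k) + x % 2^k = x := Int.mul_ediv_add_emod x (2^k)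
  have h2 : 2 * (x / 2^k / 2) + (x / 2^k) % 2 = x / 2^k := Int.mul_ediv_add_emod (x / 2^k) 2
  have hr0 : 0 ≤ x % 2^k := Int.emod_nonneg x (by positivity)
  have hr1 : x % 2^k < 2^k := Int.emod_lt_of_pos x hk
  have hs : (x / 2^k) % 2 = 0 ∨ (x / 2^k) % 2 = 1 := Int.emod_two_eq _
  have hx : x = (x % 2^k + 2^k * ((x / 2^k) % 2)) + 2^(k+1) * (x / 2^k / 2) := by
    rw [pow_succ]
    linear_combination (-1 : ℤ) * h1 - (2:ℤ)^k * h2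
  have hge : 0 ≤ x % 2^k + 2^k * ((x / 2^k) % 2) := by
    rcases hs with h | h <;> rw [h] <;> nlinarith
  have hlt : x % 2^k + 2^k * ((x / 2^k) % 2) < 2^(k+1) := by
    rw [pow_succ]; rcases hs with h | h <;> rw [h] <;> nlinarith
  conv_lhs => rw [hx]
  rw [Int.add_mul_emod_self_left, Int.emod_eq_of_lt hge hlt]

theorem pv_bitLength_pin (d : Int) (k : Nat) (h1 : 2^k ≤ d) (h2 : d < 2^(k+1)) :
    PySem.Int.bitLength d = k + 1 := by
  have hdpos : (0:Int) < d := lt_of_lt_of_le (by positivity) h1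
  have hne : d ≠ 0 := ne_of_gt hdpos
  have hub := PySem.Int.lt_two_pow_bitLength d
  have hlb := PySem.Int.two_pow_bitLength_le d hne
  have habs : (d.natAbs : Int) = d := Int.natAbs_of_nonneg hdpos.le
  have h1' : 2^k ≤ d.natAbs := by
    rw [← habs] at h1; exact_mod_cast h1
  have h2' : d.natAbs < 2^(k+1) := by
    rw [← habs] at h2; exact_mod_cast h2
  have hk1 : k < PySem.Int.bitLength d :=
    (Nat.pow_lt_pow_iff_right (by norm_num)).mp (lt_of_le_of_lt h1' hub)
  have hk2 : PySem.Int.bitLength d - 1 < k + 1 :=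
    (Nat.pow_lt_pow_iff_right (by norm_num)).mp (lt_of_le_of_lt hlb h2')
  omega

theorem pv_nextbit (value : Int) (k : Nat) :
    PySem.Int.band (value >>> k) 1 = (value / 2^k) % 2 := by
  rw [PySem.Int.band_one, PySem.Int.mod_eq_emod_of_pos (by norm_num),
    Int.shiftRight_eq_div_pow]
  push_cast
  ring_nf

theorem pv_loop_eq (value b : Int) (hb : b = 0 ∨ b = 1) (k : Nat) (c : Int) :
    cntb_softLoop value b k c = c + k - PySem.Int.bitLength (pvDiffWord value b k) := by
  induction k generalizing c with
  | zero =>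
    rcases hb with rfl | rfl <;>
      simp [cntb_softLoop, pvDiffWord, PySem.Int.bitLength_zero]
  | succ k ih =>
    have hk : (0:Int) < 2^k := by positivity
    have hr0 : 0 ≤ value % 2^k := Int.emod_nonneg value (by positivity)
    have hr1 : value % 2^k < 2^k := Int.emod_lt_of_pos value hk
    have hsplit := pv_emod_split value k
    have hs : (value / 2^k) % 2 = 0 ∨ (value / 2^k) % 2 = 1 := Int.emod_two_eq _
    rw [cntb_softLoop, pv_nextbit]
    rcases hb with rfl | rfl <;> rcases hs with hsv | hsv
    · -- b = 0, next bit 0: bits equal, recurse; diff word unchanged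
      have hdw : pvDiffWord value 0 (k+1) = pvDiffWord value 0 k := by
        have e1 : pvDiffWord value 0 (k+1) = value % 2^(k+1) := by simp [pvDiffWord]
        have e2 : pvDiffWord value 0 k = value % 2^k := by simp [pvDiffWord]
        rw [e1, e2, hsplit, hsv]; ring
      rw [hsv, if_neg (by simp), ih, hdw]
      push_cast; ring
    · -- b = 0, next bit 1: break; diff word has top bit k
      have hdw : pvDiffWord value 0 (k+1) = value % 2^k + 2^k := by
        have e1 : pvDiffWord value 0 (k+1) = value % 2^(k+1) := by simp [pvDiffWord]
        rw [e1, hsplit, hsv]; ring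
      have hbound1 : 2^k ≤ pvDiffWord value 0 (k+1) := by rw [hdw]; nlinarith
      have hbound2 : pvDiffWord value 0 (k+1) < 2^(k+1) := by
        rw [hdw, pow_succ]; nlinarith
      rw [hsv, if_pos (by norm_num),
        pv_bitLength_pin (pvDiffWord value 0 (k+1)) k hbound1 hbound2]
      push_cast; ring
    · -- b = 1, next bit 0: break; diff word has top bit k
      have hdw : pvDiffWord value 1 (k+1) = 2^(k+1) - 1 - value % 2^k := by
        have e1 : pvDiffWord value 1 (k+1) = 2^(k+1) - 1 - value % 2^(k+1) := by
          simp [pvDiffWord]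
        rw [e1, hsplit, hsv]; ring
      have hbound1 : 2^k ≤ pvDiffWord value 1 (k+1) := by
        rw [hdw, pow_succ]; nlinarith
      have hbound2 : pvDiffWord value 1 (k+1) < 2^(k+1) := by
        rw [hdw, pow_succ]; nlinarith
      rw [hsv, if_pos (by norm_num),
        pv_bitLength_pin (pvDiffWord value 1 (k+1)) k hbound1 hbound2]
      push_cast; ring
    · -- b = 1, next bit 1: bits equal, recurse; diff word unchanged
      have hdw : pvDiffWord value 1 (k+1) = pvDiffWord value 1 k := by
        have e1 : pvDiffWord value 1 (k+1) = 2^(k+1) - 1 - value % 2^(k+1) := by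
          simp [pvDiffWord]
        have e2 : pvDiffWord value 1 k = 2^k - 1 - value % 2^k := by simp [pvDiffWord]
        rw [e1, e2, hsplit, hsv, pow_succ]; ring
      rw [hsv, if_neg (by simp), ih, hdw]
      push_cast; ring

-- ===== VERDICT (by name: the statement is the Claim_ definition above) =====
theorem cntb_soft_spec : Claim_equal_cntb_soft := by
  intro value index _ hpre
  unfold Spec_cntb_soft cntb_soft cntb_soft_alt
  have hidx : (index.toNat : Int) = index := Int.toNat_of_nonneg hpre
  have hshift : (1:Int) <<< index.toNat = 2 ^ index.toNat := by
    rw [← Int.shiftLeft_natCast_right, Int.one_shiftLeft]; push_cast; ring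
  have hmodb : PySem.Int.band (value >>> index.toNat) 1
      = (value >>> index.toNat) % 2 := by
    rw [PySem.Int.band_one]; exact PySem.Int.mod_eq_emod_of_pos (by norm_num)
  have hmod2 : PySem.Int.mod (value >>> index.toNat) 2
      = (value >>> index.toNat) % 2 := PySem.Int.mod_eq_emod_of_pos (by norm_num)
  have hb01 : (value >>> index.toNat) % 2 = 0 ∨ (value >>> index.toNat) % 2 = 1 :=
    Int.emod_two_eq _
  rw [pv_loop_eq value _ (by rw [hmodb]; exact hb01) index.toNat 0]
  simp only [hmodb, hmod2, hshift, pvDiffWord]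
  rcases hb01 with h | h <;> rw [h] <;> norm_num <;> exact hpre
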